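-- pv_equiv track=rewrite | github.com/JaimePSantos/sqw | sqw/tesselations.py | even_cycle_two_tesselation
-- ===== SOURCE A (Python) =====
-- def even_cycle_two_tesselation(N):
--     tesselations = []
--     for c in range(2):
--         tesselation_aux = []
--         for x in range(N//2):
--             tesselation_aux.append([2*x + c, (2*x + 1 + c) % N])
--
--         tesselations.append(tesselation_aux)
--
--     return tesselations
-- ===== SOURCE B (Python) =====
-- def even_cycle_two_tesselation(N):
--     tesselations = [[], []]
--     for i in range(2 * (N // 2)):
--         tesselations[i % 2].append([i, (i + 1) % N])
--     return tesselations
-- ===== Notes on version B (the rewrite author's own statement) =====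
-- stated objective: simpler
-- what changed: B builds both tessellations in one pass over all 2*(N//2) edge indices, dispatching each edge [i,(i+1)%N] to the list chosen by the parity of i, instead of two separate loops with the offset formula 2*x+c.
import Mathlib
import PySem

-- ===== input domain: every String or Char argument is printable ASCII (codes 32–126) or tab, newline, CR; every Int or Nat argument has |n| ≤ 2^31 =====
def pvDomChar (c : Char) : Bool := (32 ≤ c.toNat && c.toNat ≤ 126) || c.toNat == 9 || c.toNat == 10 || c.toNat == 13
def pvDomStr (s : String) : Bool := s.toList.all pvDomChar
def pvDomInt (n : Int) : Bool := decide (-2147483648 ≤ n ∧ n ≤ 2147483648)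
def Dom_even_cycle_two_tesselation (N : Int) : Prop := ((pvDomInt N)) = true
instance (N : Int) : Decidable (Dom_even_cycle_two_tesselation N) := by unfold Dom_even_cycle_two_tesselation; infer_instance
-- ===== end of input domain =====

-- B builds both tessellations in one pass over all edge indices, dispatching by parity of i,
-- instead of A's two separate loops with the 2*x + c offset formula. Objective: simpler.

-- ===== PORT A =====
def even_cycle_two_tesselation (N : Int) : List (List (List Int)) :=
  (PySem.List.pyRange 0 2 1).foldl (fun tesselations c =>
    tesselations ++
      [(PySem.List.pyRange 0 (PySem.Int.floordiv N 2) 1).foldl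
        (fun aux x => aux ++ [[2 * x + c, PySem.Int.mod (2 * x + 1 + c) N]]) []])
    []

-- ===== PORT B =====
-- one step of B's single loop: append edge [i, (i+1) % N] to the list chosen by i % 2
def pvAltStep (N : Int) (t : List (List Int) × List (List Int)) (i : Int) :
    List (List Int) × List (List Int) :=
  if PySem.Int.mod i 2 == 0 then (t.1 ++ [[i, PySem.Int.mod (i + 1) N]], t.2)
  else (t.1, t.2 ++ [[i, PySem.Int.mod (i + 1) N]])

def even_cycle_two_tesselation_alt (N : Int) : List (List (List Int)) :=
  let t := (PySem.List.pyRange 0 (2 * PySem.Int.floordiv N 2) 1).foldl (pvAltStep N) ([], [])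
  [t.1, t.2]

-- ===== PRECONDITION & SPEC =====
def Spec_even_cycle_two_tesselation (N : Int) (out : List (List (List Int))) : Prop := out = even_cycle_two_tesselation_alt N
instance (N : Int) (out : List (List (List Int))) : Decidable (Spec_even_cycle_two_tesselation N out) := by unfold Spec_even_cycle_two_tesselation; infer_instance

-- ===== CLAIM (what is proved, stated in full; the proofs are below) =====
def Claim_equal_even_cycle_two_tesselation : Prop := ∀ (N : Int), Dom_even_cycle_two_tesselation N → Spec_even_cycle_two_tesselation N (even_cycle_two_tesselation N)

-- ===== LEMMAS AND PROOFS =====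

-- B's loop over range(2n) produces exactly the even-start and odd-start edge lists
lemma pvAltLoop (N : Int) (n : Nat) (t : List (List Int) × List (List Int)) :
    (PySem.List.pyRange 0 (2 * (n : Int)) 1).foldl (pvAltStep N) t
      = (t.1 ++ (List.range n).map (fun (k : Nat) => ([2 * (k : Int), PySem.Int.mod (2 * (k : Int) + 1) N] : List Int)),
         t.2 ++ (List.range n).map (fun (k : Nat) => ([2 * (k : Int) + 1, PySem.Int.mod (2 * (k : Int) + 2) N] : List Int))) := by
  induction n generalizing t with
  | zero => simp [PySem.List.pyRange_one_eq_nil]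
  | succ n ih =>
    have h2 : (2 : Int) * ((n : Int) + 1) = (2 * (n : Int) + 1) + 1 := by ring
    push_cast
    rw [h2, PySem.List.pyRange_one_succ_right (by omega),
        PySem.List.pyRange_one_succ_right (by omega),
        List.foldl_append, List.foldl_append, ih]
    simp [pvAltStep, List.range_succ]
    congr 1

theorem even_cycle_two_tesselation_spec : Claim_equal_even_cycle_two_tesselation := by
  intro N _
  unfold Spec_even_cycle_two_tesselation even_cycle_two_tesselation even_cycle_two_tesselation_alt
  have hr2 : PySem.List.pyRange 0 2 1 = [0, 1] := by decide
  rw [hr2]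
  simp only [List.foldl]
  by_cases hm : 0 ≤ PySem.Int.floordiv N 2
  · obtain ⟨n, hn⟩ : ∃ n : Nat, PySem.Int.floordiv N 2 = (n : Int) :=
      ⟨(PySem.Int.floordiv N 2).toNat, (Int.toNat_of_nonneg hm).symm⟩
    rw [hn, pvAltLoop N n ([], [])]
    rw [PySem.List.foldl_append_singleton_eq_map, PySem.List.foldl_append_singleton_eq_map,
        PySem.List.pyRange_one]
    simp only [sub_zero, Int.toNat_natCast, List.map_map, List.nil_append,
      List.cons_append]
    congr 1
    · apply List.map_congr_left; intro k _; simp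
    congr 1
    · apply List.map_congr_left; intro k _; simp; congr 1
  · have h1 : PySem.List.pyRange 0 (PySem.Int.floordiv N 2) 1 = [] :=
      PySem.List.pyRange_one_eq_nil (by omega)
    have h2 : PySem.List.pyRange 0 (2 * PySem.Int.floordiv N 2) 1 = [] :=
      PySem.List.pyRange_one_eq_nil (by omega)
    rw [h1, h2]
    simp
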